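-- pv_equiv track=rewrite | github.com/thepratholic/Competitive-Programming | LeetCode/Weekly Contest 496/Minimum Increase to Maximize Special Indices.py | minIncrease
-- ===== SOURCE A (Python) =====
-- from functools import lru_cache
--
-- def minIncrease(nums) -> int:
--     n = len(nums)
--
--     if n & 1:
--         ans = 0
--         for i in range(1, n - 1, 2):
--             ans += max(0, max(nums[i - 1], nums[i + 1]) + 1 - nums[i])
--
--         return ans
--
--     @lru_cache(None)
--     def f(idx, skip):
--         if idx >= n - 1:
--             return 0
--
--         cost = max(0, max(nums[idx - 1], nums[idx + 1]) + 1 - nums[idx])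
--
--         if skip:
--             return cost + f(idx + 2, True)
--
--         else:
--             return cost + min(f(idx + 2, False), f(idx + 3, True))
--
--     return min(f(1, False), f(2, True))
-- ===== SOURCE B (Python) =====
-- def minIncrease(nums) -> int:
--     n = len(nums)
--
--     if n & 1:
--         return sum(max(0, max(nums[i - 1], nums[i + 1]) + 1 - nums[i])
--                    for i in range(1, n - 1, 2))
--
--     # Even n: bottom-up DP with rolling variables instead of memoized recursion.
--     # s1,s2,s3 hold dp_skip[idx], dp_skip[idx+1], dp_skip[idx+2]; u1,u2 hold
--     # dp_noskip[idx], dp_noskip[idx+1] after processing idx (0 for idx >= n-1).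
--     s1 = s2 = s3 = 0
--     u1 = u2 = 0
--     for idx in range(n - 2, 0, -1):
--         cost = max(0, max(nums[idx - 1], nums[idx + 1]) + 1 - nums[idx])
--         s1, s2, s3, u1, u2 = cost + s2, s1, s2, cost + min(u2, s3), u1
--     return min(u1, s2)
-- ===== Notes on version B (the rewrite author's own statement) =====
-- stated objective: alternative
-- what changed: The even-length branch's lru_cache top-down recursion f(idx, skip) is replaced by a bottom-up loop over idx from n-2 down to 1 carrying five rolling DP values (no recursion, no cache), and the odd-length accumulator loop by a sum over a generator.
import Mathlib
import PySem

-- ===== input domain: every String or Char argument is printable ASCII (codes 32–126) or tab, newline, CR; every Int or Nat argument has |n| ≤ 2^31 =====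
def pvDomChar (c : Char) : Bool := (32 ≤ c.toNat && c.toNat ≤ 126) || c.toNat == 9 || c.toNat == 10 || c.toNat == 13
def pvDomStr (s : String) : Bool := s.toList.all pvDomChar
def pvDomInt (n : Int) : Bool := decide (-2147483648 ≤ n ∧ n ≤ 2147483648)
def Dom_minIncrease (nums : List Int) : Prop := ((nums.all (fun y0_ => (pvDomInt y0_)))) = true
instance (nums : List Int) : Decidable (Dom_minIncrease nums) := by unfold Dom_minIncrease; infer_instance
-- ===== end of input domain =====

-- B replaces A's memoized top-down recursion (even case) by a bottom-up loop with
-- five rolling variables, and A's accumulator loop (odd case) by a map-sum (objective: alternative).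

-- shared helper: the cost expression both Pythons write verbatim.
-- Indices idx-1, idx, idx+1 are always in range at every call site (1 ≤ idx ≤ n-2),
-- so '.getD 0' is never taken; pyGet? is the exact Python indexing.
def pvCost (nums : List Int) (idx : Int) : Int :=
  max 0 (max ((PySem.List.pyGet? nums (idx - 1)).getD 0)
             ((PySem.List.pyGet? nums (idx + 1)).getD 0) + 1
         - (PySem.List.pyGet? nums idx).getD 0)

-- ===== PORT A =====
-- A's inner memoized recursion f(idx, skip); memoization does not change the value.
def minIncreaseF (nums : List Int) (n : Int) (idx : Int) (skip : Bool) : Int :=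
  if n - 1 ≤ idx then 0
  else
    let cost := pvCost nums idx
    if skip then cost + minIncreaseF nums n (idx + 2) true
    else cost + min (minIncreaseF nums n (idx + 2) false) (minIncreaseF nums n (idx + 3) true)
termination_by (n - 1 - idx).toNat
decreasing_by all_goals omega

def minIncrease (nums : List Int) : Int :=
  let n : Int := nums.length
  if PySem.Int.band n 1 = 1 then
    (PySem.List.pyRange 1 (n - 1) 2).foldl (fun ans i => ans + pvCost nums i) 0
  else
    min (minIncreaseF nums n 1 false) (minIncreaseF nums n 2 true)

-- ===== PORT B =====
-- Source B's loop body on the state (s1, s2, s3, u1, u2)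
def pvStep (nums : List Int) (st : Int × Int × Int × Int × Int) (idx : Int) :
    Int × Int × Int × Int × Int :=
  let (s1, s2, s3, u1, u2) := st
  let cost := pvCost nums idx
  (cost + s2, s1, s2, cost + min u2 s3, u1)

def minIncrease_alt (nums : List Int) : Int :=
  let n : Int := nums.length
  if PySem.Int.band n 1 = 1 then
    ((PySem.List.pyRange 1 (n - 1) 2).map (fun i => pvCost nums i)).sum
  else
    let st := (PySem.List.pyRange (n - 2) 0 (-1)).foldl (pvStep nums) (0, 0, 0, 0, 0)
    min st.2.2.2.1 st.2.1

-- ===== PRECONDITION & SPEC =====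
def Spec_minIncrease (nums : List Int) (out : Int) : Prop := out = minIncrease_alt nums
instance (nums : List Int) (out : Int) : Decidable (Spec_minIncrease nums out) := by unfold Spec_minIncrease; infer_instance

-- ===== CLAIM (what is proved, stated in full; the proofs are below) =====
def Claim_equal_minIncrease : Prop := ∀ (nums : List Int), Dom_minIncrease nums → Spec_minIncrease nums (minIncrease nums)

-- ===== LEMMAS AND PROOFS =====

-- loop invariant: after running Source B's loop from n-2 down to a+1 the state holds
-- (f(a+1,T), f(a+2,T), f(a+3,T), f(a+1,F), f(a+2,F)); here stated by downward induction.
theorem pvLoop_inv (nums : List Int) (n : Int) (a : Nat) (ha : (a : Int) ≤ n - 2) :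
    (PySem.List.pyRange a 0 (-1)).foldl (pvStep nums)
      (minIncreaseF nums n ((a : Int) + 1) true,
       minIncreaseF nums n ((a : Int) + 2) true,
       minIncreaseF nums n ((a : Int) + 3) true,
       minIncreaseF nums n ((a : Int) + 1) false,
       minIncreaseF nums n ((a : Int) + 2) false)
    = (minIncreaseF nums n 1 true, minIncreaseF nums n 2 true, minIncreaseF nums n 3 true,
       minIncreaseF nums n 1 false, minIncreaseF nums n 2 false) := by
  induction a with
  | zero =>
      rw [PySem.List.pyRange_neg_one_eq_nil (by omega)]
      norm_num
  | succ a ih =>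
      rw [PySem.List.pyRange_neg_one_cons (by push_cast; omega)]
      have h1 : minIncreaseF nums n ((a : Int) + 1) true
          = pvCost nums ((a : Int) + 1) + minIncreaseF nums n ((a : Int) + 3) true := by
        rw [minIncreaseF]; rw [if_neg (by push_cast at ha ⊢; omega)]
        rw [show ((a : Int) + 1 + 2) = (a : Int) + 3 by ring]; simp
      have h2 : minIncreaseF nums n ((a : Int) + 1) false
          = pvCost nums ((a : Int) + 1)
            + min (minIncreaseF nums n ((a : Int) + 3) false)
                  (minIncreaseF nums n ((a : Int) + 4) true) := by
        rw [minIncreaseF]; rw [if_neg (by push_cast at ha ⊢; omega)]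
        rw [show ((a : Int) + 1 + 2) = (a : Int) + 3 by ring,
            show ((a : Int) + 1 + 3) = (a : Int) + 4 by ring]; simp
      have hstep : pvStep nums
          (minIncreaseF nums n ((a : Int) + 2) true,
           minIncreaseF nums n ((a : Int) + 3) true,
           minIncreaseF nums n ((a : Int) + 4) true,
           minIncreaseF nums n ((a : Int) + 2) false,
           minIncreaseF nums n ((a : Int) + 3) false) ((a : Int) + 1)
          = (minIncreaseF nums n ((a : Int) + 1) true,
             minIncreaseF nums n ((a : Int) + 2) true,
             minIncreaseF nums n ((a : Int) + 3) true,
             minIncreaseF nums n ((a : Int) + 1) false,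
             minIncreaseF nums n ((a : Int) + 2) false) := by
        simp only [pvStep, h1, h2]
      have hcast : ((a + 1 : Nat) : Int) = (a : Int) + 1 := by push_cast; ring
      simp only [hcast, List.foldl_cons]
      have hsh : ((a : Int) + 1) - 1 = (a : Int) := by ring
      rw [show ((a : Int) + 1 + 1) = (a : Int) + 2 by ring,
          show ((a : Int) + 1 + 2) = (a : Int) + 3 by ring,
          show ((a : Int) + 1 + 3) = (a : Int) + 4 by ring, hstep, hsh]
      exact ih (by push_cast at ha ⊢; omega)

theorem pvF_base (nums : List Int) (n idx : Int) (h : n - 1 ≤ idx) (skip : Bool) :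
    minIncreaseF nums n idx skip = 0 := by
  rw [minIncreaseF, if_pos h]

-- ===== VERDICT (by name: the statement is the Claim_ definition above) =====
theorem minIncrease_spec : Claim_equal_minIncrease := by
  intro nums _
  unfold Spec_minIncrease minIncrease minIncrease_alt
  set n : Int := (nums.length : Int) with hn
  by_cases hodd : PySem.Int.band n 1 = 1
  · simp only [hodd, if_pos]
    -- odd case: accumulator fold = map-sum
    rw [PySem.List.foldl_add]
    simp
  · simp only [hodd, if_false]
    by_cases h2 : 2 ≤ n
    · have hinit :
          ((0 : Int), (0 : Int), (0 : Int), (0 : Int), (0 : Int))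
          = (minIncreaseF nums n (((n - 2).toNat : Int) + 1) true,
             minIncreaseF nums n (((n - 2).toNat : Int) + 2) true,
             minIncreaseF nums n (((n - 2).toNat : Int) + 3) true,
             minIncreaseF nums n (((n - 2).toNat : Int) + 1) false,
             minIncreaseF nums n (((n - 2).toNat : Int) + 2) false) := by
        rw [pvF_base nums n _ (by omega), pvF_base nums n _ (by omega),
            pvF_base nums n _ (by omega), pvF_base nums n _ (by omega),
            pvF_base nums n _ (by omega)]
      have hc : (((n - 2).toNat : Int)) = n - 2 := by omega
      rw [show (n - 2) = (((n - 2).toNat : Int)) from hc.symm, hinit,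
          pvLoop_inv nums n (n - 2).toNat (by omega)]
    · -- n = 0 (n even, n < 2, n = length ≥ 0): empty loop, all values 0
      have hn0 : n = 0 := by
        have hnn : 0 ≤ n := by simp [hn]
        interval_cases n
        · rfl
        · exact absurd (by decide) hodd
      rw [hn0]
      rw [PySem.List.pyRange_neg_one_eq_nil (by omega)]
      simp [pvF_base nums 0 1 (by omega), pvF_base nums 0 2 (by omega)]
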